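-- pv_equiv track=rewrite | github.com/nasa/opera-sds-int | aws_hysds.py | get_unique_resources
-- ===== SOURCE A (Python) =====
-- def get_unique_resources(resource_map, prefix, sub_name):
--     # Build up all the Auto-Scaling Group names that match the prefix and sub_name but have to do two passes
--     absolute_asg_names = []
--     for key in resource_map:
--         if key.startswith(prefix) and key.find(sub_name) != -1:
--             absolute_asg_names.append(key)
--
--     # but if sub_name is exactly the string that the auto-scaling group ends with, then only that auto-scaling group is used
--     # This is necessary because we have asg names that's like data_download and data_download_hist
--     # But we have to be careful and not think that just "d" is a unique sub_name
--     unique_absolute_asg_names = []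
--     for key in absolute_asg_names:
--         if key[-len(sub_name):] == sub_name:
--             if len(unique_absolute_asg_names) == 0:
--                 unique_absolute_asg_names = [key]
--             else:
--                 unique_absolute_asg_names = absolute_asg_names
--                 break
--
--     if unique_absolute_asg_names == []:
--         unique_absolute_asg_names = absolute_asg_names
--
--     return unique_absolute_asg_names
-- ===== SOURCE B (Python) =====
-- def get_unique_resources(resource_map, prefix, sub_name):
--     # Single fused pass: collect matches while simultaneously counting keys that
--     # end with sub_name and remembering the first such key; branch once at the end.
--     matches = []
--     first_end = None
--     end_count = 0
--     for key in resource_map: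
--         if key.startswith(prefix) and key.find(sub_name) != -1:
--             matches.append(key)
--             if key[-len(sub_name):] == sub_name:
--                 end_count += 1
--                 if first_end is None:
--                     first_end = key
--     return [first_end] if end_count == 1 else matches
-- ===== Notes on version B (the rewrite author's own statement) =====
-- stated objective: alternative
-- what changed: Replaces A's two staged passes (build the filtered list, then re-scan it with a stateful accumulator and early break) by one fused pass that maintains the match list, a count of suffix-matching keys and the first such key, branching exactly once at the end.
import Mathlib
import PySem

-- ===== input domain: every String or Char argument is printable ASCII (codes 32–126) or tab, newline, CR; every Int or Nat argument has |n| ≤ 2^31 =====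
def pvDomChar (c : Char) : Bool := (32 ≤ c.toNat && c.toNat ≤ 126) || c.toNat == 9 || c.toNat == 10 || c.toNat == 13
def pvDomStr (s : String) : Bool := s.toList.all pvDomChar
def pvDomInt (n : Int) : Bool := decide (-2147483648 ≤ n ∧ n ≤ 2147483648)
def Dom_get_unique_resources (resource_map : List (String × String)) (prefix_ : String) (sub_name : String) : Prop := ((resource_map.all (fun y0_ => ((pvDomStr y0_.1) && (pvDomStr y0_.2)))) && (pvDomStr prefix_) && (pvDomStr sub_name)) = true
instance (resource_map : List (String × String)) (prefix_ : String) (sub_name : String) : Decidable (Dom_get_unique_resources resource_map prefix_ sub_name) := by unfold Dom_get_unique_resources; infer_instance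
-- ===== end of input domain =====

-- B fuses A's two staged passes (filter, then stateful re-scan with early break) into one
-- pass maintaining the match list, a suffix-match count and the first suffix-matching key
-- (objective: alternative decomposition; same asymptotic cost).

-- shared tests, exactly as both Pythons write them:
-- key.startswith(prefix) and key.find(sub_name) != -1
def pvMatchTest (prefix_ sub_name key : String) : Bool :=
  PySem.Str.startswith key prefix_ && (PySem.Str.find key sub_name != -1)
-- key[-len(sub_name):] == sub_name
def pvEndTest (sub_name key : String) : Bool :=
  PySem.Str.slice key (some (-(sub_name.length : Int))) none == sub_name

-- ===== PORT A =====
-- A's second loop: stateful accumulator; the 'break' returns `absolute` directly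
def pvUniqLoopA (absolute : List String) (sub_name : String) : List String → List String → List String
  | acc, [] => acc
  | acc, key :: rest =>
    if pvEndTest sub_name key then
      if acc.length = 0 then pvUniqLoopA absolute sub_name [key] rest
      else absolute
    else pvUniqLoopA absolute sub_name acc rest

def get_unique_resources (resource_map : List (String × String)) (prefix_ : String) (sub_name : String) : List String :=
  -- 'for key in resource_map' iterates the dict's keys (first-occurrence order)
  let keys := (PySem.Dict.ofList resource_map).keys
  let absolute_asg_names := keys.foldl
    (fun acc key => if pvMatchTest prefix_ sub_name key then acc ++ [key] else acc) []
  let unique_absolute_asg_names := pvUniqLoopA absolute_asg_names sub_name [] absolute_asg_names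
  if unique_absolute_asg_names = [] then absolute_asg_names else unique_absolute_asg_names

-- ===== PORT B =====
-- B's single fused pass; state = (matches, first_end, end_count)
def pvStepB (prefix_ sub_name : String) (st : List String × Option String × Int) (key : String) :
    List String × Option String × Int :=
  if pvMatchTest prefix_ sub_name key then
    if pvEndTest sub_name key then
      (st.1 ++ [key], (if st.2.1.isNone then some key else st.2.1), st.2.2 + 1)
    else (st.1 ++ [key], st.2.1, st.2.2)
  else st

def get_unique_resources_alt (resource_map : List (String × String)) (prefix_ : String) (sub_name : String) : List String :=
  let st := (PySem.Dict.ofList resource_map).keys.foldl (pvStepB prefix_ sub_name) ([], none, 0)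
  if st.2.2 = 1 then [st.2.1.getD ""] else st.1

-- ===== PRECONDITION & SPEC =====
def Spec_get_unique_resources (resource_map : List (String × String)) (prefix_ : String) (sub_name : String) (out : List String) : Prop := out = get_unique_resources_alt resource_map prefix_ sub_name
instance (resource_map : List (String × String)) (prefix_ : String) (sub_name : String) (out : List String) : Decidable (Spec_get_unique_resources resource_map prefix_ sub_name out) := by unfold Spec_get_unique_resources; infer_instance

-- ===== CLAIM (what is proved, stated in full; the proofs are below) =====
def Claim_equal_get_unique_resources : Prop := ∀ (resource_map : List (String × String)) (prefix_ : String) (sub_name : String), Dom_get_unique_resources resource_map prefix_ sub_name → Spec_get_unique_resources resource_map prefix_ sub_name (get_unique_resources resource_map prefix_ sub_name)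

-- ===== LEMMAS AND PROOFS =====

-- once the accumulator is the singleton [a], A's loop returns [a] if no further key matches,
-- and `absolute` (early break) at the first further match
theorem pvUniqLoopA_single (absolute : List String) (sub_name : String) (a : String) :
    ∀ l : List String,
      pvUniqLoopA absolute sub_name [a] l =
        if l.filter (pvEndTest sub_name) = [] then [a] else absolute := by
  intro l
  induction l with
  | nil => simp [pvUniqLoopA]
  | cons k rest ih =>
    by_cases hk : pvEndTest sub_name k = true
    · simp [pvUniqLoopA, hk]
    · simp only [Bool.not_eq_true] at hk
      simp [pvUniqLoopA, hk, ih]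

-- A's full second loop, characterised by the filtered "ending" list
theorem pvUniqLoopA_nil (absolute : List String) (sub_name : String) :
    ∀ l : List String,
      pvUniqLoopA absolute sub_name [] l =
        match l.filter (pvEndTest sub_name) with
        | [] => []
        | [e] => [e]
        | _ :: _ :: _ => absolute := by
  intro l
  induction l with
  | nil => simp [pvUniqLoopA]
  | cons k rest ih =>
    by_cases hk : pvEndTest sub_name k = true
    · rw [List.filter_cons_of_pos hk]
      simp only [pvUniqLoopA, hk, if_true, List.length_nil]
      rw [pvUniqLoopA_single]
      rcases h : rest.filter (pvEndTest sub_name) with _ | ⟨e, t⟩ <;> simp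
    · simp only [Bool.not_eq_true] at hk
      rw [List.filter_cons_of_neg (by simp [hk])]
      simp only [pvUniqLoopA, hk, Bool.false_eq_true, if_false]
      exact ih

-- B's fused pass computes the match filter, the head of the suffix-filtered list and its length
theorem pvStepB_foldl (prefix_ sub_name : String) :
    ∀ (l : List String) (m : List String) (fe : Option String) (c : Int),
      l.foldl (pvStepB prefix_ sub_name) (m, fe, c) =
        (m ++ l.filter (pvMatchTest prefix_ sub_name),
         fe.or ((l.filter (pvMatchTest prefix_ sub_name)).filter (pvEndTest sub_name)).head?,
         c + (((l.filter (pvMatchTest prefix_ sub_name)).filter (pvEndTest sub_name)).length : Int)) := by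
  intro l
  induction l with
  | nil => simp
  | cons k rest ih =>
    intro m fe c
    by_cases hm : pvMatchTest prefix_ sub_name k = true
    · by_cases he : pvEndTest sub_name k = true
      · simp only [List.foldl_cons, pvStepB, hm, he, if_true,
          List.filter_cons_of_pos, ih]
        rcases fe with _ | a <;>
          simp [Option.or] <;> omega
      · simp only [Bool.not_eq_true] at he
        simp only [List.foldl_cons, pvStepB, hm, he, if_true, Bool.false_eq_true, if_false, ih]
        simp [List.filter_cons_of_pos hm, List.filter_cons_of_neg (by simp [he] : ¬ pvEndTest sub_name k = true)]
    · simp only [Bool.not_eq_true] at hm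
      simp only [List.foldl_cons, pvStepB, hm, Bool.false_eq_true, if_false, ih]
      simp [List.filter_cons_of_neg (by simp [hm] : ¬ pvMatchTest prefix_ sub_name k = true)]

-- ===== VERDICT (by name: the statement is the Claim_ definition above) =====
theorem get_unique_resources_spec : Claim_equal_get_unique_resources := by
  intro resource_map prefix_ sub_name _
  unfold Spec_get_unique_resources get_unique_resources get_unique_resources_alt
  simp only [PySem.List.foldl_append_if_eq_filter, List.nil_append, pvStepB_foldl]
  rw [pvUniqLoopA_nil]
  rcases h : ((PySem.Dict.ofList resource_map).keys.filter (pvMatchTest prefix_ sub_name)).filter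
      (pvEndTest sub_name) with _ | ⟨e, _ | ⟨e2, t2⟩⟩
  · simp
  · simp [Option.or]
  · have hne : (PySem.Dict.ofList resource_map).keys.filter (pvMatchTest prefix_ sub_name) ≠ [] := by
      intro hc; rw [hc] at h; simp at h
    simp [hne, Option.or]
    omega
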